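-- pv_equiv track=rewrite | github.com/SVCE-ACM/A-December-of-Algorithms-2020 | December-01/python3_anusha_devulapally_Sherlock's_quest.py | sum_left_right
-- ===== SOURCE A (Python) =====
-- def conv_no(s):
--   p=0
--   s=s[::-1]
--   for i in s:
--     p=i+p*10
--   return p
--
-- def sum_left_right(n):
--   digits=[]
--   while(n>0):
--     p=n%10
--     digits.append(p)
--     n=n//10
--   mid=len(digits)//2
--   left=digits[:mid]
--   right=digits[mid:]
--   sum_l=conv_no(left)
--   sum_r=conv_no(right)
--   return sum_l+sum_r
-- ===== SOURCE B (Python) =====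
-- def sum_left_right(n):
--     if n <= 0:
--         return 0
--     mid = len(str(n)) // 2
--     p = 10 ** mid
--     return n % p + n // p
-- ===== Notes on version B (the rewrite author's own statement) =====
-- stated objective: simpler
-- what changed: replaces A's digit-list construction, list slicing and per-digit reversed reconstruction with a closed-form arithmetic split of n at the middle digit position (remainder plus quotient by the corresponding power of ten; zero for non-positive n, matching A's empty loop)
import Mathlib
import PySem

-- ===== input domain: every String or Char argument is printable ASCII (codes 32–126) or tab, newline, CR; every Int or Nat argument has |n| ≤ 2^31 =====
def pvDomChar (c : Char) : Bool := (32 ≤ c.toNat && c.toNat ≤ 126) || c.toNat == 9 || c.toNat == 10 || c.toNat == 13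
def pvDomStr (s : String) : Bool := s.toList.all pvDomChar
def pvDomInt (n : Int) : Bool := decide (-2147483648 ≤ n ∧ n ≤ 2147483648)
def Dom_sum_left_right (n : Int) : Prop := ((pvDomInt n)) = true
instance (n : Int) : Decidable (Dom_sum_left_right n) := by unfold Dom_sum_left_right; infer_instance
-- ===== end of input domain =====

-- B computes the same value by a closed-form arithmetic split (n % 10^mid + n // 10^mid)
-- instead of A's digit list, slicing and per-digit reconstruction; objective: simpler.

-- ===== PORT A =====
def conv_no (s : List Int) : Int :=
  -- s = s[::-1]; for i in s: p = i + p*10  (slice? with step -1 never raises)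
  let s' := (PySem.List.slice? s none none (-1)).getD []
  s'.foldl (fun p i => i + p * 10) 0

-- the while-loop of sum_left_right: while n > 0: digits.append(n % 10); n = n // 10
def sumLRLoop (n : Int) (digits : List Int) : List Int :=
  if 0 < n then
    sumLRLoop (PySem.Int.floordiv n 10) (digits ++ [PySem.Int.mod n 10])
  else digits
termination_by n.toNat
decreasing_by
  rename_i h
  rw [PySem.Int.floordiv_eq_ediv_of_pos (by omega)]
  omega

def sum_left_right (n : Int) : Int :=
  let digits := sumLRLoop n []
  let mid : Int := PySem.Int.floordiv (digits.length : Int) 2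
  let left := PySem.List.slice digits none (some mid)
  let right := PySem.List.slice digits (some mid) none
  let sum_l := conv_no left
  let sum_r := conv_no right
  sum_l + sum_r

-- ===== PORT B =====
def sum_left_right_alt (n : Int) : Int :=
  if n ≤ 0 then 0
  else
    let mid : Int := PySem.Int.floordiv (PySem.Str.len (PySem.Int.toStr n)) 2
    -- 10 ** mid; mid = len(str(n))//2 ≥ 0, so the Nat exponent is exact
    let p : Int := 10 ^ mid.toNat
    PySem.Int.mod n p + PySem.Int.floordiv n p

-- ===== PRECONDITION & SPEC =====
def Spec_sum_left_right (n : Int) (out : Int) : Prop := out = sum_left_right_alt n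
instance (n : Int) (out : Int) : Decidable (Spec_sum_left_right n out) := by unfold Spec_sum_left_right; infer_instance

-- ===== CLAIM (what is proved, stated in full; the proofs are below) =====
def Claim_equal_sum_left_right : Prop := ∀ (n : Int), Dom_sum_left_right n → Spec_sum_left_right n (sum_left_right n)

-- ===== LEMMAS AND PROOFS =====

-- the digit list (least-significant first) A's loop builds, as a structural recursion on Nat
def digN (m : Nat) : List Int :=
  if h : m = 0 then [] else ((m % 10 : Nat) : Int) :: digN (m / 10)
termination_by m
decreasing_by exact Nat.div_lt_self (Nat.pos_of_ne_zero h) (by omega)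

-- the value a LSB-first digit list denotes
def valD (l : List Int) : Int := l.foldr (fun i p => i + p * 10) 0

theorem conv_no_eq_valD (s : List Int) : conv_no s = valD s := by
  simp [conv_no, PySem.List.slice?_none_none_neg_one, valD, List.foldl_reverse]

theorem sumLRLoop_eq (m : Nat) : ∀ acc : List Int, sumLRLoop (m : Int) acc = acc ++ digN m := by
  induction m using Nat.strong_induction_on with
  | _ m ih =>
    intro acc
    rw [sumLRLoop, digN]
    by_cases h : m = 0
    · simp [h]
    · have hm : 0 < m := Nat.pos_of_ne_zero h
      rw [if_pos (by exact_mod_cast hm), dif_neg h]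
      rw [show PySem.Int.floordiv (m : Int) 10 = ((m / 10 : Nat) : Int) from PySem.Int.floordiv_natCast m 10,
          show PySem.Int.mod (m : Int) 10 = ((m % 10 : Nat) : Int) from PySem.Int.mod_natCast m 10]
      rw [ih (m / 10) (Nat.div_lt_self hm (by omega))]
      simp

theorem sumLRLoop_nonpos (n : Int) (hn : n ≤ 0) : sumLRLoop n [] = [] := by
  rw [sumLRLoop, if_neg (by omega)]

theorem valD_digN (m : Nat) : valD (digN m) = (m : Int) := by
  induction m using Nat.strong_induction_on with
  | _ m ih =>
    rw [digN]
    by_cases h : m = 0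
    · simp [h, valD]
    · rw [dif_neg h]
      have hrec := ih (m / 10) (Nat.div_lt_self (Nat.pos_of_ne_zero h) (by omega))
      have : valD (((m % 10 : Nat) : Int) :: digN (m / 10))
          = ((m % 10 : Nat) : Int) + valD (digN (m / 10)) * 10 := rfl
      rw [this, hrec]
      have := Nat.mod_add_div m 10
      push_cast
      omega

theorem valD_take_drop (k : Nat) : ∀ m : Nat,
    valD ((digN m).take k) = ((m % 10 ^ k : Nat) : Int) ∧
    valD ((digN m).drop k) = ((m / 10 ^ k : Nat) : Int) := by
  induction k with
  | zero =>
    intro m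
    refine ⟨by simp [valD], ?_⟩
    simpa using valD_digN m
  | succ k ih =>
    intro m
    rw [digN]
    by_cases h : m = 0
    · simp [h, valD]
    · rw [dif_neg h]
      have h1 := (ih (m / 10)).1
      have h2 := (ih (m / 10)).2
      constructor
      · rw [List.take_succ_cons]
        have : valD (((m % 10 : Nat) : Int) :: (digN (m / 10)).take k)
            = ((m % 10 : Nat) : Int) + valD ((digN (m / 10)).take k) * 10 := rfl
        rw [this, h1]
        have hmm : m % (10 * 10 ^ k) = m % 10 + 10 * (m / 10 % 10 ^ k) := Nat.mod_mul
        have hp : (10 : Nat) ^ (k + 1) = 10 * 10 ^ k := by ring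
        rw [hp, hmm]
        push_cast
        ring
      · rw [List.drop_succ_cons, h2]
        have : m / 10 / 10 ^ k = m / 10 ^ (k + 1) := by
          rw [Nat.div_div_eq_div_mul]
          congr 1
          ring
        rw [this]

-- length of Nat.toDigits (the body of str(n)) equals the length of the digit list, for positive n
theorem toDigitsCore_len : ∀ (fuel n : Nat) (acc : List Char), n < fuel → 0 < n →
    (Nat.toDigitsCore 10 fuel n acc).length = (digN n).length + acc.length := by
  intro fuel
  induction fuel with
  | zero => intro n acc h; omega
  | succ f ih =>
    intro n acc hlt hn
    rw [digN, dif_neg (Nat.pos_iff_ne_zero.mp hn)]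
    simp only [Nat.toDigitsCore]
    by_cases h10 : n / 10 = 0
    · rw [if_pos h10, digN, dif_pos h10]
      simp
      omega
    · rw [if_neg h10]
      have hdlt : n / 10 < f := by
        have := Nat.div_lt_self hn (show 1 < 10 by omega)
        omega
      rw [ih (n / 10) ((n % 10).digitChar :: acc) hdlt (Nat.pos_of_ne_zero h10)]
      rw [digN, dif_neg h10]
      simp
      omega

theorem len_toChars (m : Nat) (hm : 0 < m) :
    (PySem.Int.toChars (m : Int)).length = (digN m).length := by
  rw [PySem.Int.toChars, if_neg (by omega)]
  have h1 : ((m : Int)).toNat = m := rfl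
  rw [h1, Nat.toDigits]
  rw [toDigitsCore_len (m + 1) m [] (by omega) hm]
  simp

theorem sum_left_right_spec_pos (m : Nat) (hm : 0 < m) :
    sum_left_right (m : Int) = sum_left_right_alt (m : Int) := by
  have hds : sumLRLoop (m : Int) [] = digN m := by simpa using sumLRLoop_eq m []
  set k : Nat := (digN m).length / 2 with hk
  have hmid : PySem.Int.floordiv (((digN m).length : Int)) 2 = (k : Int) := by
    rw [hk]; exact_mod_cast PySem.Int.floordiv_natCast (digN m).length 2
  -- A side
  have hA : sum_left_right (m : Int)
      = ((m % 10 ^ k : Nat) : Int) + ((m / 10 ^ k : Nat) : Int) := by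
    simp only [sum_left_right, hds, hmid]
    rw [PySem.List.slice_to_natCast, PySem.List.slice_from_natCast,
        conv_no_eq_valD, conv_no_eq_valD,
        (valD_take_drop k m).1, (valD_take_drop k m).2]
  -- B side
  have h0 : ¬ ((m : Int) ≤ 0) := by omega
  have hlen : PySem.Str.len (PySem.Int.toStr (m : Int)) = (((digN m).length : Nat) : Int) := by
    rw [PySem.Str.len_eq, PySem.Int.toList_toStr, len_toChars m hm]
  have hB : sum_left_right_alt (m : Int)
      = ((m % 10 ^ k : Nat) : Int) + ((m / 10 ^ k : Nat) : Int) := by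
    rw [sum_left_right_alt, if_neg h0]
    simp only [hlen, hmid, Int.toNat_natCast]
    have hp : (10 : Int) ^ k = ((10 ^ k : Nat) : Int) := by push_cast; ring
    rw [hp, PySem.Int.mod_natCast, PySem.Int.floordiv_natCast]
  rw [hA, hB]

-- ===== VERDICT (by name: the statement is the Claim_ definition above) =====
theorem sum_left_right_spec : Claim_equal_sum_left_right := by
  intro n _
  unfold Spec_sum_left_right
  by_cases hn : 0 < n
  · obtain ⟨m, rfl⟩ : ∃ m : Nat, n = (m : Int) := ⟨n.toNat, by omega⟩
    exact sum_left_right_spec_pos m (by exact_mod_cast hn)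
  · have hn' : n ≤ 0 := by omega
    rw [sum_left_right_alt, if_pos hn']
    simp only [sum_left_right, sumLRLoop_nonpos n hn']
    simp [PySem.List.slice, conv_no, PySem.List.slice?]
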